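-- pv_equiv track=rewrite | github.com/RedisLabs/gkemarketplace | usage-meter/tier_pricing.py | tier_from_usage
-- ===== SOURCE A (Python) =====
-- tiers = [
-- 'small_node_time',
-- 'small_high_memory_node_time',
-- 'medium_high_memory_node_time',
-- 'large_high_memory_node_time',
-- 'extra_large_high_memory_node_time'
-- ]
--
-- cpu_tiers = [32,16,8,4,0]
--
-- memory_tiers = [208,104,52,26,0]
--
-- def tier_from_usage(data):
--    tier = 0
--    cpu = data.get('cpu')
--    for index, value in enumerate(cpu_tiers):
--       if cpu >= value:
--          tier = max(tier,len(tiers)-index-1)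
--    memory = data.get('memory')
--    for index, value in enumerate(memory_tiers):
--       if memory >= value:
--          tier = max(tier,len(tiers)-index-1)
--    return tiers[tier]
-- ===== SOURCE B (Python) =====
-- tiers = [
-- 'small_node_time',
-- 'small_high_memory_node_time',
-- 'medium_high_memory_node_time',
-- 'large_high_memory_node_time',
-- 'extra_large_high_memory_node_time'
-- ]
--
-- _cpu_asc = [0, 4, 8, 16, 32]
-- _mem_asc = [0, 26, 52, 104, 208]
--
--
-- def _bisect_right(a, x):
--     lo, hi = 0, len(a)
--     while lo < hi:
--         mid = (lo + hi) // 2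
--         if x < a[mid]:
--             hi = mid
--         else:
--             lo = mid + 1
--     return lo
--
--
-- def tier_from_usage(data):
--     cpu = data['cpu']
--     memory = data['memory']
--     c = max(0, _bisect_right(_cpu_asc, cpu) - 1)
--     m = max(0, _bisect_right(_mem_asc, memory) - 1)
--     return tiers[max(c, m)]
-- ===== Notes on version B (the rewrite author's own statement) =====
-- stated objective: idiomatic
-- what changed: Replaces the two accumulator loops over descending threshold lists (max over all matching tiers) with a hand-written binary search (bisect_right) over ascending threshold lists, taking the clamped bucket index for cpu and memory and the max of the two.
import Mathlib
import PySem

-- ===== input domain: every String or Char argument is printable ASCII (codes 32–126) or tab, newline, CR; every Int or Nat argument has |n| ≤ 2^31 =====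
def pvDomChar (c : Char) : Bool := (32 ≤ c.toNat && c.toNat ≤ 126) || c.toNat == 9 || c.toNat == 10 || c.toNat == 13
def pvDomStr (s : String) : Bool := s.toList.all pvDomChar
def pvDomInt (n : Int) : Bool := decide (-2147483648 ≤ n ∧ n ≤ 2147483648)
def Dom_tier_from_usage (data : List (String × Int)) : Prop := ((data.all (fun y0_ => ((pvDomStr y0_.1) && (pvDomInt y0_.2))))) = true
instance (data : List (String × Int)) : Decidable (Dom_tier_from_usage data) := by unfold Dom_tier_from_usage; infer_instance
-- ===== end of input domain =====

-- B replaces the two max-accumulator scans of A with a binary search over ascending threshold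
-- lists (idiomatic bisect-style bucketing); equivalence is proved whenever both keys are present.


-- ===== PORT A =====
def pvTiers : List String :=
  ["small_node_time", "small_high_memory_node_time", "medium_high_memory_node_time",
   "large_high_memory_node_time", "extra_large_high_memory_node_time"]

def pvCpuTiers : List Int := [32, 16, 8, 4, 0]

def pvMemoryTiers : List Int := [208, 104, 52, 26, 0]

-- one of A's 'for index, value in enumerate(...)' accumulator loops
def pvTierLoop (v : Int) (thresholds : List Int) (tier : Nat) : Nat :=
  (PySem.List.enumerate thresholds).foldl
    (fun tier iv => if v ≥ iv.2 then max tier (pvTiers.length - iv.1.toNat - 1) else tier) tier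

def tier_from_usage (data : List (String × Int)) : String :=
  match (PySem.Dict.mk data).get? "cpu" with
  | none => ""            -- Python: None >= int raises TypeError; excluded by Pre_
  | some cpu =>
    let tier := pvTierLoop cpu pvCpuTiers 0
    match (PySem.Dict.mk data).get? "memory" with
    | none => ""          -- TypeError; excluded by Pre_
    | some memory =>
      let tier := pvTierLoop memory pvMemoryTiers tier
      ((PySem.List.pyGet? pvTiers (tier : Int)).getD "")

-- ===== PORT B =====
def pvCpuAsc : List Int := [0, 4, 8, 16, 32]
def pvMemAsc : List Int := [0, 26, 52, 104, 208]

-- B's hand-written bisect_right loop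
def pvBisectRight (a : List Int) (x : Int) (lo hi : Nat) : Nat :=
  if _h : lo < hi then
    let mid := (lo + hi) / 2
    if x < a.getD mid 0 then pvBisectRight a x lo mid
    else pvBisectRight a x (mid + 1) hi
  else lo
termination_by hi - lo

def tier_from_usage_alt (data : List (String × Int)) : String :=
  match (PySem.Dict.mk data).get? "cpu" with
  | none => ""            -- Python: KeyError; excluded by Pre_
  | some cpu =>
    match (PySem.Dict.mk data).get? "memory" with
    | none => ""          -- KeyError; excluded by Pre_
    | some memory =>
      let c : Int := max 0 ((pvBisectRight pvCpuAsc cpu 0 pvCpuAsc.length : Int) - 1)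
      let m : Int := max 0 ((pvBisectRight pvMemAsc memory 0 pvMemAsc.length : Int) - 1)
      ((PySem.List.pyGet? pvTiers (max c m)).getD "")

-- ===== PRECONDITION & SPEC =====
-- Pre_ excludes inputs missing the 'cpu' or 'memory' key, on which A raises TypeError.
def Pre_tier_from_usage (data : List (String × Int)) : Prop :=
  "cpu" ∈ data.map Prod.fst ∧ "memory" ∈ data.map Prod.fst
instance (data : List (String × Int)) : Decidable (Pre_tier_from_usage data) := by
  unfold Pre_tier_from_usage; infer_instance
def pvWitness_tier_from_usage : (List (String × Int)) := [("cpu", 6), ("memory", 300)]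

def Spec_tier_from_usage (data : List (String × Int)) (out : String) : Prop := out = tier_from_usage_alt data
instance (data : List (String × Int)) (out : String) : Decidable (Spec_tier_from_usage data out) := by unfold Spec_tier_from_usage; infer_instance

-- ===== CLAIM (what is proved, stated in full; the proofs are below) =====
def Claim_equal_tier_from_usage : Prop := ∀ (data : List (String × Int)), Dom_tier_from_usage data → Pre_tier_from_usage data → Spec_tier_from_usage data (tier_from_usage data)

-- ===== LEMMAS AND PROOFS =====

-- common bucket index: number of thresholds strictly below the next one that v reaches
def pvIdx (v : Int) (t1 t2 t3 t4 : Int) : Nat :=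
  if v ≥ t4 then 4 else if v ≥ t3 then 3 else if v ≥ t2 then 2 else if v ≥ t1 then 1 else 0

lemma tierLoop_cpu (v : Int) (t : Nat) :
    pvTierLoop v pvCpuTiers t = max t (pvIdx v 4 8 16 32) := by
  simp [pvTierLoop, pvCpuTiers, pvTiers, PySem.List.enumerate, pvIdx]
  split_ifs <;> omega

lemma tierLoop_mem (v : Int) (t : Nat) :
    pvTierLoop v pvMemoryTiers t = max t (pvIdx v 26 52 104 208) := by
  simp [pvTierLoop, pvMemoryTiers, pvTiers, PySem.List.enumerate, pvIdx]
  split_ifs <;> omega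

lemma bisect_cpu (v : Int) :
    max 0 ((pvBisectRight pvCpuAsc v 0 pvCpuAsc.length : Int) - 1) = (pvIdx v 4 8 16 32 : Int) := by
  by_cases h1 : v < 4 <;> by_cases h2 : v < 8 <;> by_cases h3 : v < 16 <;> by_cases h4 : v < 32 <;>
    by_cases h0 : v < 0 <;>
    simp_all [pvBisectRight, pvCpuAsc, pvIdx] <;> omega

lemma bisect_mem (v : Int) :
    max 0 ((pvBisectRight pvMemAsc v 0 pvMemAsc.length : Int) - 1) = (pvIdx v 26 52 104 208 : Int) := by
  by_cases h1 : v < 26 <;> by_cases h2 : v < 52 <;> by_cases h3 : v < 104 <;> by_cases h4 : v < 208 <;>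
    by_cases h0 : v < 0 <;>
    simp_all [pvBisectRight, pvMemAsc, pvIdx] <;> omega

lemma get?_isSome_of_mem (data : List (String × Int)) (k : String)
    (h : k ∈ data.map Prod.fst) : ((PySem.Dict.mk data).get? k).isSome := by
  induction data with
  | nil => simp at h
  | cons p rest ih =>
    simp only [List.map_cons, List.mem_cons] at h
    rw [PySem.Dict.get?_mk_cons]
    by_cases hk : p.1 == k
    · simp [hk]
    · rcases h with h | h
      · exact absurd (by simp [h]) hk
      · simp [hk]; exact ih h

-- ===== VERDICT (by name: the statement is the Claim_ definition above) =====
theorem tier_from_usage_spec : Claim_equal_tier_from_usage := by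
  intro data _dom hpre
  obtain ⟨hc, hm⟩ := hpre
  unfold Spec_tier_from_usage tier_from_usage tier_from_usage_alt
  obtain ⟨cpu, hcpu⟩ := Option.isSome_iff_exists.mp (get?_isSome_of_mem data "cpu" hc)
  obtain ⟨memory, hmem⟩ := Option.isSome_iff_exists.mp (get?_isSome_of_mem data "memory" hm)
  rw [hcpu, hmem]
  simp only [tierLoop_cpu, tierLoop_mem, bisect_cpu, bisect_mem]
  congr 1
  generalize pvIdx cpu 4 8 16 32 = a
  generalize pvIdx memory 26 52 104 208 = b
  have hh : ((max (max 0 a) b : Nat) : Int) = max (a : Int) (b : Int) := by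
    simp [Nat.cast_max]
  rw [hh]
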